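-- pv_equiv track=rewrite | github.com/abdullayevzzz/Static_Code_Analyzer | Static Code Analyzer/task/analyzer/code_analyzer.py | comment_locator
-- ===== SOURCE A (Python) =====
-- def comment_locator(line):
--     new_line_list = list(line)
--     for index, char in enumerate(line[1:], start=1):
--         if char in ["'", '"'] and line[index - 1] == '\\':
--             new_line_list[index] = '_'
--     for num, char in enumerate(new_line_list):
--         if char == '#':
--             odd_chars = [c for c in new_line_list[:num] if c == '"' or c == "'"]
--             if not odd_chars:
--                 return num
--             elif len(odd_chars) >= 2 and odd_chars[0] == odd_chars[-1]:
--                 return num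
--     return None
-- ===== SOURCE B (Python) =====
-- def comment_locator(line):
--     cnt = 0
--     first = None
--     last = None
--     prev = None
--     for i, ch in enumerate(line):
--         if ch == '#':
--             if cnt == 0 or (cnt >= 2 and first == last):
--                 return i
--         elif (ch == "'" or ch == '"') and prev != '\\':
--             cnt += 1
--             if first is None:
--                 first = ch
--             last = ch
--         prev = ch
--     return None
-- ===== Notes on version B (the rewrite author's own statement) =====
-- stated objective: alternative
-- what changed: Replaced the escape-marking pass plus a re-filter of the whole prefix at each hash character with one left-to-right pass that maintains a running count of unescaped quotes and the first/last such quote.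
import Mathlib
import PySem

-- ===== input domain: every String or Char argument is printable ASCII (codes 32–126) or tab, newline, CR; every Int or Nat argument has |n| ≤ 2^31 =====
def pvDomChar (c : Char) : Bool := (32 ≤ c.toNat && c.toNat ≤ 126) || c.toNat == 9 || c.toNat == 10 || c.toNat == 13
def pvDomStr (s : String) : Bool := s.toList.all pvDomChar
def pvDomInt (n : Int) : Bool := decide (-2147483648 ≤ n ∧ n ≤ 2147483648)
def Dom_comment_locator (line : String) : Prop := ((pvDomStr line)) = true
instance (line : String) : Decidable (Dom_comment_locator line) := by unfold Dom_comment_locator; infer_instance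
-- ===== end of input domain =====

-- B replaces A's escape-marking pass plus a re-scan of the whole prefix at each hash character by one
-- left-to-right pass maintaining the count and the first/last of the unescaped quotes (alternative).

-- ===== PORT A =====

-- the comprehension's condition: c == '"' or c == "'"
def clF (c : Char) : Bool := c == '"' || c == '\''

-- enumerate(line[1:], start=1): index-char pairs starting at 1 (indices here are Nat; all are nonnegative)
def clEnumFrom : Nat → List Char → List (Nat × Char)
  | _, [] => []
  | k, c :: rs => (k, c) :: clEnumFrom (k + 1) rs

-- first loop of A: new_line_list[index] = '_' for quotes preceded by '\\'
-- (line[index-1] is always in range since index ≥ 1, so getElem? is exact)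
def clMarkLoop (orig : List Char) (nll : List Char) : List (Nat × Char) → List Char
  | [] => nll
  | (index, char) :: rest =>
      if (char = '\'' ∨ char = '"') ∧ orig[index - 1]? = some '\\' then
        clMarkLoop orig (nll.set index '_') rest
      else
        clMarkLoop orig nll rest

-- second loop of A: enumerate(new_line_list); odd_chars = the quotes in new_line_list[:num]
def clScanLoop (nll : List Char) : List Char → Nat → Option Int
  | [], _ => none
  | char :: rest, num =>
      if char = '#' then
        if (nll.take num).filter clF = [] then some (num : Int)
        else if 2 ≤ ((nll.take num).filter clF).length ∧
                 ((nll.take num).filter clF).head? = ((nll.take num).filter clF).getLast? then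
          some (num : Int)
        else clScanLoop nll rest (num + 1)
      else clScanLoop nll rest (num + 1)

def comment_locator (line : String) : Option Int :=
  let l := line.toList
  let nll := clMarkLoop l l (clEnumFrom 1 (l.drop 1))
  clScanLoop nll nll 0

-- ===== PORT B =====

def clAltLoop : List Char → Nat → Nat → Option Char → Option Char → Option Char → Option Int
  | [], _, _, _, _, _ => none
  | ch :: rest, i, cnt, first, last, prev =>
      if ch = '#' then
        if cnt = 0 ∨ (2 ≤ cnt ∧ first = last) then some (i : Int)
        else clAltLoop rest (i + 1) cnt first last (some ch)
      else if (ch = '\'' ∨ ch = '"') ∧ prev ≠ some '\\' then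
        clAltLoop rest (i + 1) (cnt + 1) (if first = none then some ch else first) (some ch) (some ch)
      else clAltLoop rest (i + 1) cnt first last (some ch)

def comment_locator_alt (line : String) : Option Int :=
  clAltLoop line.toList 0 0 none none none

-- ===== PRECONDITION & SPEC =====
def Spec_comment_locator (line : String) (out : Option Int) : Prop := out = comment_locator_alt line
instance (line : String) (out : Option Int) : Decidable (Spec_comment_locator line out) := by unfold Spec_comment_locator; infer_instance

-- ===== CLAIM (what is proved, stated in full; the proofs are below) =====
def Claim_equal_comment_locator : Prop := ∀ (line : String), Dom_comment_locator line → Spec_comment_locator line (comment_locator line)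

-- ===== LEMMAS AND PROOFS =====

-- the marked list, computed functionally with the running previous (original) character
def clMrk : Option Char → List Char → List Char
  | _, [] => []
  | prev, c :: rs =>
      (if (c = '\'' ∨ c = '"') ∧ prev = some '\\' then '_' else c) :: clMrk (some c) rs

theorem clMarkLoop_eq (l : List Char) :
    ∀ (suf : List Char) (k : Nat) (nll : List Char), 1 ≤ k →
      l.drop k = suf → nll.length = l.length → (∀ j, k ≤ j → nll[j]? = l[j]?) →
      clMarkLoop l nll (clEnumFrom k suf) = nll.take k ++ clMrk l[k-1]? suf := by
  intro suf
  induction suf with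
  | nil =>
      intro k nll _ hdrop hlen _
      have hk : l.length ≤ k := by
        by_contra h
        simp at h
        have := List.drop_eq_nil_iff.mp hdrop
        omega
      simp [clEnumFrom, clMarkLoop, clMrk, List.take_of_length_le (by omega : nll.length ≤ k)]
  | cons c rs ih =>
      intro k nll hk hdrop hlen hagree
      have hklt : k < l.length := by
        by_contra h
        simp at h
        rw [List.drop_eq_nil_iff.mpr h] at hdrop
        simp at hdrop
      have hlk : l[k]? = some c := by
        have : (l.drop k)[0]? = some c := by rw [hdrop]; rfl
        simpa [List.getElem?_drop] using this
      have hnk : nll[k]? = some c := by rw [hagree k (le_refl k)]; exact hlk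
      have hdrop' : l.drop (k+1) = rs := by
        have : (l.drop k).drop 1 = rs := by rw [hdrop]; rfl
        simpa [List.drop_drop] using this
      have hkn : k < nll.length := by omega
      rw [clEnumFrom, clMarkLoop, clMrk]
      split
      · next hcond =>
        rw [ih (k+1) (nll.set k '_') (by omega) hdrop' (by simpa using hlen)
              (by intro j hj
                  rw [List.getElem?_set_ne (by omega)]
                  exact hagree j (by omega))]
        have hsimp : l[k+1-1]? = l[k]? := by norm_num
        rw [hsimp, hlk]
        have htake : (nll.set k '_').take (k+1) = nll.take k ++ ['_'] := by
          rw [List.take_add_one]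
          simp [List.take_set, hkn, List.set_eq_of_length_le]
        rw [htake]
        simp
      · next hcond =>
        rw [ih (k+1) nll (by omega) hdrop' hlen (fun j hj => hagree j (by omega))]
        have hsimp : l[k+1-1]? = l[k]? := by norm_num
        rw [hsimp, hlk]
        have htake : nll.take (k+1) = nll.take k ++ [c] := by
          rw [List.take_add_one]
          have : nll[k]?.toList = [c] := by rw [hnk]; rfl
          rw [this]
        rw [htake]
        simp

theorem clMark_top (l : List Char) :
    clMarkLoop l l (clEnumFrom 1 (l.drop 1)) = clMrk none l := by
  cases l with
  | nil => simp [clEnumFrom, clMarkLoop, clMrk]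
  | cons c rs =>
      rw [clMarkLoop_eq (c :: rs) ((c :: rs).drop 1) 1 (c :: rs) (le_refl 1) rfl rfl
            (fun j _ => rfl)]
      simp [clMrk]

theorem clFilter_append_singleton (mp : List Char) (c : Char) (h : clF c = true) :
    ((mp ++ [c]).filter clF).head? = (if (mp.filter clF).head? = none then some c else (mp.filter clF).head?)
    ∧ ((mp ++ [c]).filter clF).getLast? = some c
    ∧ ((mp ++ [c]).filter clF).length = (mp.filter clF).length + 1 := by
  rw [List.filter_append]
  have : [c].filter clF = [c] := by simp [List.filter, h]
  rw [this]
  refine ⟨?_, ?_, by simp⟩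
  · cases hmp : mp.filter clF with
    | nil => simp
    | cons a as => simp
  · simp [List.getLast?_append]

theorem clScan_eq_alt :
    ∀ (suf mp : List Char) (prev : Option Char),
      clScanLoop ((mp ++ clMrk prev suf)) (clMrk prev suf) mp.length
        = clAltLoop suf mp.length (mp.filter clF).length (mp.filter clF).head?
            (mp.filter clF).getLast? prev := by
  intro suf
  induction suf with
  | nil => intro mp prev; simp [clMrk, clScanLoop, clAltLoop]
  | cons c rs ih =>
      intro mp prev
      rw [clMrk]
      set m := (if (c = '\'' ∨ c = '"') ∧ prev = some '\\' then '_' else c) with hm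
      have hnll : mp ++ m :: clMrk (some c) rs = (mp ++ [m]) ++ clMrk (some c) rs := by simp
      have htake : ((mp ++ [m]) ++ clMrk (some c) rs).take mp.length = mp := by
        rw [List.take_append_of_le_length (by simp)]
        simp
      have hrec := ih (mp ++ [m]) (some c)
      simp only [List.length_append, List.length_cons, List.length_nil, Nat.zero_add] at hrec
      by_cases hesc : (c = '\'' ∨ c = '"') ∧ prev = some '\\'
      -- escaped quote: marked to underscore, A skips it; B takes the final else branch
      · have hm' : m = '_' := by rw [hm, if_pos hesc]
        rw [hnll, clScanLoop]
        rw [if_neg (by rw [hm']; decide)]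
        rw [hrec]
        have hmf : clF m = false := by rw [hm']; decide
        have hfil : (mp ++ [m]).filter clF = mp.filter clF := by
          rw [List.filter_append]; simp [List.filter, hmf]
        rw [hfil]
        rw [clAltLoop]
        rw [if_neg (by
              intro hc
              rcases hesc.1 with h | h <;> rw [h] at hc <;> exact absurd hc (by decide))]
        rw [if_neg (by intro hcond; exact hcond.2 hesc.2)]
      · have hm' : m = c := by rw [hm, if_neg hesc]
        rw [hnll, clScanLoop]
        by_cases hch : c = '#'
        -- a hash: both sides test the same condition on the quote statistics of the prefix
        · rw [if_pos (by rw [hm', hch])]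
          rw [htake]
          rw [clAltLoop, if_pos hch]
          by_cases h0 : mp.filter clF = []
          · rw [if_pos h0]
            rw [if_pos (Or.inl (by rw [h0]; rfl))]
          · rw [if_neg h0]
            by_cases h2 : 2 ≤ (mp.filter clF).length ∧ (mp.filter clF).head? = (mp.filter clF).getLast?
            · rw [if_pos h2, if_pos (Or.inr h2)]
            · rw [if_neg h2]
              rw [if_neg (by
                    rintro (hc0 | hc2)
                    · exact h0 (List.eq_nil_of_length_eq_zero hc0)
                    · exact h2 hc2)]
              rw [hrec]
              have hmf : clF m = false := by rw [hm', hch]; decide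
              have hfil : (mp ++ [m]).filter clF = mp.filter clF := by
                rw [List.filter_append]; simp [List.filter, hmf]
              rw [hfil]
        · rw [if_neg (by rw [hm']; exact hch)]
          rw [hrec]
          rw [clAltLoop, if_neg hch]
          by_cases hq : (c = '\'' ∨ c = '"')
          -- unescaped quote: the filtered prefix gains c; B's (cnt, first, last) gain c
          · have hprev : prev ≠ some '\\' := fun hp => hesc ⟨hq, hp⟩
            rw [if_pos ⟨hq, hprev⟩]
            have hfc : clF c = true := by rcases hq with h | h <;> rw [h] <;> decide
            obtain ⟨hh, hl, hlen⟩ := clFilter_append_singleton mp c hfc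
            rw [hm']
            rw [hh, hl, hlen]
          · rw [if_neg (fun hcond => hq hcond.1)]
            have hmf : clF m = false := by
              rw [hm']
              cases h : clF c
              · rfl
              · exfalso
                apply hq
                simp only [clF, Bool.or_eq_true, beq_iff_eq] at h
                tauto
            have hfil : (mp ++ [m]).filter clF = mp.filter clF := by
              rw [List.filter_append]; simp [List.filter, hmf]
            rw [hfil]

-- ===== VERDICT (by name: the statement is the Claim_ definition above) =====
theorem comment_locator_spec : Claim_equal_comment_locator := by
  intro line _
  unfold Spec_comment_locator comment_locator comment_locator_alt
  simp only []
  rw [clMark_top line.toList]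
  have := clScan_eq_alt line.toList [] none
  simpa using this
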